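-- pv_equiv track=rewrite | github.com/cortega26/noticiencias_news_collector | tools/placeholder_audit.py | track_fences
-- ===== SOURCE A (Python) =====
-- from typing import Any, Dict, List, Optional, Sequence, Set, Tuple
--
-- def track_fences(content: str) -> Set[int]:
--     inside = False
--     fence_lines: Set[int] = set()
--     fence_delimiter: Optional[str] = None
--     for idx, line in enumerate(content.splitlines(), start=1):
--         stripped = line.strip()
--         if stripped.startswith("```") or stripped.startswith("~~~"):
--             delimiter = stripped[:3]
--             if inside and fence_delimiter == delimiter:
--                 inside = False
--                 fence_delimiter = None
--             else:
--                 inside = True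
--                 fence_delimiter = delimiter
--             continue
--         if inside:
--             fence_lines.add(idx)
--     return fence_lines
-- ===== SOURCE B (Python) =====
-- def track_fences(content):
--     lines = content.splitlines()
--     markers = []
--     for idx, line in enumerate(lines, start=1):
--         stripped = line.strip()
--         if stripped.startswith("```") or stripped.startswith("~~~"):
--             markers.append((idx, stripped[:3]))
--     fence_lines = set()
--     inside = False
--     fence_delimiter = None
--     for pos, (m_idx, m_delim) in enumerate(markers):
--         if inside and fence_delimiter == m_delim:
--             inside = False
--             fence_delimiter = None
--         else:
--             inside = True
--             fence_delimiter = m_delim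
--         if inside:
--             end = markers[pos + 1][0] if pos + 1 < len(markers) else len(lines) + 1
--             fence_lines.update(range(m_idx + 1, end))
--     return fence_lines
-- ===== Notes on version B (the rewrite author's own statement) =====
-- stated objective: alternative
-- what changed: B first extracts the list of fence-marker lines (line number, 3-char delimiter) in one scan, then walks only the markers with the inside/delimiter state and fills each enclosed half-open line-number range at once, instead of A's single pass that tests and flags every line individually.
import Mathlib
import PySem

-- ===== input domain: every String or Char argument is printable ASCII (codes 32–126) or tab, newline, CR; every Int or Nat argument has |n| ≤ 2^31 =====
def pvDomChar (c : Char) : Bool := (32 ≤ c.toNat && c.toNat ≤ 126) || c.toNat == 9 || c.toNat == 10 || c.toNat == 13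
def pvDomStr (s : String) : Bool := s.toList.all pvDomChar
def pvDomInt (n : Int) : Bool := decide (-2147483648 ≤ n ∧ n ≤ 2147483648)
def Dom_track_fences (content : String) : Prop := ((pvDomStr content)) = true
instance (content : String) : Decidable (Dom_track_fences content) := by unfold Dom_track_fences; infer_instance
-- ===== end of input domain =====

-- B scans once for fence markers, then fills the half-open interior ranges between them (alternative decomposition; same behaviour, including re-open-on-mismatch and unterminated trailing fences).


-- ===== PORT A =====
-- loop body of A's single pass: state = (inside, fence_lines, fence_delimiter)
def trackStep (st : Bool × PySem.Set Int × Option String) (p : Int × String) :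
    Bool × PySem.Set Int × Option String :=
  let stripped := PySem.Str.strip p.2
  if PySem.Str.startswith stripped "```" || PySem.Str.startswith stripped "~~~" then
    let delimiter := PySem.Str.slice stripped none (some 3)
    if st.1 && (st.2.2 == some delimiter) then (false, st.2.1, none)
    else (true, st.2.1, some delimiter)
  else if st.1 then (st.1, PySem.Set.add st.2.1 p.1, st.2.2)
  else st

def track_fences (content : String) : List Int :=
  ((PySem.List.enumerate (PySem.Str.splitlines content) 1).foldl trackStep
    (false, PySem.Set.empty, none)).2.1

-- ===== PORT B =====
-- B's first pass: the fence-marker lines, as (line number, 3-char delimiter), numbered from i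
def fenceMarkers (lines : List String) (i : Int) : List (Int × String) :=
  match lines with
  | [] => []
  | l :: ls =>
    let stripped := PySem.Str.strip l
    if PySem.Str.startswith stripped "```" || PySem.Str.startswith stripped "~~~" then
      (i, PySem.Str.slice stripped none (some 3)) :: fenceMarkers ls (i + 1)
    else fenceMarkers ls (i + 1)

-- markers[pos+1][0] if pos+1 < len(markers) else len(lines)+1
def nextFence (rest : List (Int × String)) (stop : Int) : Int :=
  match rest with
  | [] => stop
  | (m, _) :: _ => m

-- B's second pass: walk the markers, emitting the interior range after each opening marker
def fenceWalk (ms : List (Int × String)) (inside : Bool) (delim : Option String) (stop : Int) :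
    List Int :=
  match ms with
  | [] => []
  | (m, d) :: rest =>
    let st : Bool × Option String :=
      if inside && (delim == some d) then (false, none) else (true, some d)
    (if st.1 then PySem.List.pyRange (m + 1) (nextFence rest stop) else [])
      ++ fenceWalk rest st.1 st.2 stop

def track_fences_alt (content : String) : List Int :=
  PySem.Set.ofList (fenceWalk (fenceMarkers (PySem.Str.splitlines content) 1) false none
    (((PySem.Str.splitlines content).length : Int) + 1))

-- ===== PRECONDITION & SPEC =====
def Spec_track_fences (content : String) (out : List Int) : Prop := out = track_fences_alt content
instance (content : String) (out : List Int) : Decidable (Spec_track_fences content out) := by unfold Spec_track_fences; infer_instance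

-- ===== CLAIM (what is proved, stated in full; the proofs are below) =====
def Claim_equal_track_fences : Prop := ∀ (content : String), Dom_track_fences content → Spec_track_fences content (track_fences content)

-- ===== LEMMAS AND PROOFS =====

-- the sequence of line numbers A adds, in order, starting at line i with the given state
def seqA (ls : List String) (i : Int) (inside : Bool) (delim : Option String) : List Int :=
  match ls with
  | [] => []
  | l :: ls =>
    let stripped := PySem.Str.strip l
    if PySem.Str.startswith stripped "```" || PySem.Str.startswith stripped "~~~" then
      let d := PySem.Str.slice stripped none (some 3)
      if inside && (delim == some d) then seqA ls (i + 1) false none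
      else seqA ls (i + 1) true (some d)
    else (if inside then [i] else []) ++ seqA ls (i + 1) inside delim

theorem le_nextFence_fenceMarkers (ls : List String) (i : Int) :
    i ≤ nextFence (fenceMarkers ls i) (i + ls.length) := by
  induction ls generalizing i with
  | nil => simp [fenceMarkers, nextFence]
  | cons l ls ih =>
    simp only [fenceMarkers]
    split_ifs with h
    · simp [nextFence]
    · have := ih (i + 1)
      have hlen : i + ((l :: ls).length : Int) = (i + 1) + (ls.length : Int) := by
        simp only [List.length_cons]; push_cast; ring
      rw [hlen]
      omega

theorem seqA_eq_walk (ls : List String) (i : Int) (inside : Bool) (delim : Option String) :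
    seqA ls i inside delim =
      (if inside then PySem.List.pyRange i (nextFence (fenceMarkers ls i) (i + ls.length)) else [])
        ++ fenceWalk (fenceMarkers ls i) inside delim (i + ls.length) := by
  induction ls generalizing i inside delim with
  | nil =>
    simp [seqA, fenceMarkers, fenceWalk, nextFence, PySem.List.pyRange_one_eq_nil (le_refl i)]
  | cons l ls ih =>
    have hlen : i + ((l :: ls).length : Int) = (i + 1) + (ls.length : Int) := by
      simp only [List.length_cons]; push_cast; ring
    by_cases hm : (PySem.Str.startswith (PySem.Str.strip l) "```"
        || PySem.Str.startswith (PySem.Str.strip l) "~~~") = true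
    · -- marker line
      have hseq : seqA (l :: ls) i inside delim =
          if inside && (delim == some (PySem.Str.slice (PySem.Str.strip l) none (some 3))) then
            seqA ls (i + 1) false none
          else seqA ls (i + 1) true (some (PySem.Str.slice (PySem.Str.strip l) none (some 3))) := by
        simp only [seqA]; rw [if_pos hm]
      have hmk : fenceMarkers (l :: ls) i =
          (i, PySem.Str.slice (PySem.Str.strip l) none (some 3)) :: fenceMarkers ls (i + 1) := by
        simp only [fenceMarkers]; rw [if_pos hm]
      rw [hseq, hmk, hlen]
      cases hc : (inside && (delim == some (PySem.Str.slice (PySem.Str.strip l) none (some 3)))) with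
      | true =>
        rw [if_pos rfl]
        rw [ih]
        simp [fenceWalk, nextFence, hc, PySem.List.pyRange_one_eq_nil (le_refl i)]
      | false =>
        rw [if_neg (by decide : ¬((false : Bool) = true))]
        rw [ih]
        simp [fenceWalk, nextFence, hc, PySem.List.pyRange_one_eq_nil (le_refl i)]
    · -- ordinary line
      have hseq : seqA (l :: ls) i inside delim =
          (if inside then [i] else []) ++ seqA ls (i + 1) inside delim := by
        simp only [seqA]; rw [if_neg hm]
      have hmk : fenceMarkers (l :: ls) i = fenceMarkers ls (i + 1) := by
        simp only [fenceMarkers]; rw [if_neg hm]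
      rw [hseq, hmk, hlen, ih]
      cases inside with
      | false => simp
      | true =>
        have hnext := le_nextFence_fenceMarkers ls (i + 1)
        rw [PySem.List.pyRange_one_cons
          (show i < nextFence (fenceMarkers ls (i + 1)) ((i + 1) + (ls.length : Int)) by omega)]
        simp

-- A's fold accumulates exactly Set.add over seqA
theorem foldA_eq_seqA (ls : List String) (i : Int) (inside : Bool) (delim : Option String)
    (acc : PySem.Set Int) :
    ((PySem.List.enumerate ls i).foldl trackStep (inside, acc, delim)).2.1
      = (seqA ls i inside delim).foldl PySem.Set.add acc := by
  induction ls generalizing i inside delim acc with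
  | nil => simp [seqA]
  | cons l ls ih =>
    simp only [PySem.List.enumerate_cons, List.foldl_cons, seqA, trackStep]
    split_ifs with hm hin <;> simp_all

-- ===== VERDICT (by name: the statement is the Claim_ definition above) =====
theorem track_fences_spec : Claim_equal_track_fences := by
  intro content _
  unfold Spec_track_fences track_fences track_fences_alt
  rw [foldA_eq_seqA, seqA_eq_walk,
    show (1 : Int) + ((PySem.Str.splitlines content).length : Int)
      = ((PySem.Str.splitlines content).length : Int) + 1 from by omega]
  simp [PySem.Set.ofList_eq_foldl, PySem.Set.empty]
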